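-- pv_equiv track=rewrite | github.com/NiniAndy/wenet | wenet/transformer/ctc.py | remove_duplicates_and_blank
-- ===== SOURCE A (Python) =====
-- def remove_duplicates_and_blank(alignment, blank_id=0):
--     """
--     去除对齐路径中的空白标签和重复标签。
--
--     alignment: 对齐路径，可能包含空白标签和重复标签。
--     blank_id: 空白标签的 ID。
--
--     返回：
--     filtered_alignment: 去除空白和重复标签后的对齐路径。
--     """
--     filtered_alignment = []
--     prev_token = None
--     for token in alignment:
--         if token != blank_id and token != prev_token:
--             filtered_alignment.append(token)
--         prev_token = token
--     return filtered_alignment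
-- ===== SOURCE B (Python) =====
-- def remove_duplicates_and_blank(alignment, blank_id=0):
--     """Run-based collapse: scan maximal runs of equal tokens, keep one
--     representative per run, drop blanks."""
--     out = []
--     i, n = 0, len(alignment)
--     while i < n:
--         tok = alignment[i]
--         j = i + 1
--         while j < n and alignment[j] == tok:
--             j += 1
--         if tok != blank_id:
--             out.append(tok)
--         i = j
--     return out
-- ===== Notes on version B (the rewrite author's own statement) =====
-- stated objective: alternative
-- what changed: Replaces the element-by-element loop carrying a prev_token state variable with a run-based scan (groupby-style): advance over each maximal run of equal tokens and emit one representative per non-blank run.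
import Mathlib
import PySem

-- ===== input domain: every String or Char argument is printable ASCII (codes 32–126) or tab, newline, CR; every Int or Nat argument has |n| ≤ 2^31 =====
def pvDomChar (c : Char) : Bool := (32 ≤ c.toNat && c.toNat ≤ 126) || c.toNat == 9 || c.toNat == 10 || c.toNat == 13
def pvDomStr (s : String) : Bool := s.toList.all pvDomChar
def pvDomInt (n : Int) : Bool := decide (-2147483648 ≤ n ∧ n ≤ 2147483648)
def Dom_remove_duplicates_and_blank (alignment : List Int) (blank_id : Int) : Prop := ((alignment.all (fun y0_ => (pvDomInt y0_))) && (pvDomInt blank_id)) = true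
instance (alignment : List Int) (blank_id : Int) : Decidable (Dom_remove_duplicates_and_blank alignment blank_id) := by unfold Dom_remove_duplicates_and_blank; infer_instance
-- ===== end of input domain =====

-- B replaces A's element-wise loop with prev_token state by a run-based scan
-- (one representative per maximal run of equal tokens, blanks dropped); objective: alternative.

-- ===== PORT A =====
-- element loop carrying (filtered_alignment, prev_token); prev_token starts as None
def pvALoop (blank_id : Int) : List Int → Option Int → List Int → List Int
  | [], _, acc => acc
  | t :: ts, prev, acc =>
      pvALoop blank_id ts (some t) (if t ≠ blank_id ∧ some t ≠ prev then acc ++ [t] else acc)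

def remove_duplicates_and_blank (alignment : List Int) (blank_id : Int) : List Int :=
  pvALoop blank_id alignment none []

-- ===== PORT B =====
-- run scan: take the run head, skip the rest of the run (inner while), recurse
def pvRuns (blank_id : Int) : List Int → List Int
  | [] => []
  | t :: rest =>
    if t ≠ blank_id then t :: pvRuns blank_id (rest.dropWhile (· == t))
    else pvRuns blank_id (rest.dropWhile (· == t))
  termination_by xs => xs.length
  decreasing_by
    all_goals simp only [List.length_cons]
    all_goals exact Nat.lt_succ_of_le (List.length_dropWhile_le _ _)

def remove_duplicates_and_blank_alt (alignment : List Int) (blank_id : Int) : List Int :=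
  pvRuns blank_id alignment

-- ===== PRECONDITION & SPEC =====
def Spec_remove_duplicates_and_blank (alignment : List Int) (blank_id : Int) (out : List Int) : Prop := out = remove_duplicates_and_blank_alt alignment blank_id
instance (alignment : List Int) (blank_id : Int) (out : List Int) : Decidable (Spec_remove_duplicates_and_blank alignment blank_id out) := by unfold Spec_remove_duplicates_and_blank; infer_instance

-- ===== CLAIM (what is proved, stated in full; the proofs are below) =====
def Claim_equal_remove_duplicates_and_blank : Prop := ∀ (alignment : List Int) (blank_id : Int), Dom_remove_duplicates_and_blank alignment blank_id → Spec_remove_duplicates_and_blank alignment blank_id (remove_duplicates_and_blank alignment blank_id)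

-- ===== LEMMAS AND PROOFS =====

-- the accumulator only collects output at the front
theorem pvALoop_acc (blank_id : Int) (xs : List Int) (prev : Option Int) (acc : List Int) :
    pvALoop blank_id xs prev acc = acc ++ pvALoop blank_id xs prev [] := by
  induction xs generalizing prev acc with
  | nil => simp [pvALoop]
  | cons t ts ih =>
      simp only [pvALoop]
      split
      · rw [ih (some t) (acc ++ [t]), ih (some t) ([] ++ [t])]; simp
      · rw [ih]

-- tokens equal to prev at the front are skipped without changing the state
theorem pvALoop_dropWhile (blank_id x : Int) (xs : List Int) :
    pvALoop blank_id xs (some x) [] = pvALoop blank_id (xs.dropWhile (· == x)) (some x) [] := by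
  induction xs with
  | nil => rfl
  | cons y ys ih =>
      by_cases h : y = x
      · subst h
        simpa [pvALoop, List.dropWhile] using ih
      · simp [h]

-- when the head differs from x, prev = some x behaves like prev = none
theorem pvALoop_prev_irrel (blank_id x : Int) (ys : List Int)
    (h : ∀ z, ys.head? = some z → z ≠ x) :
    pvALoop blank_id ys (some x) [] = pvALoop blank_id ys none [] := by
  cases ys with
  | nil => rfl
  | cons y t =>
      have hy : y ≠ x := h y rfl
      simp [pvALoop, hy]

theorem pvALoop_eq_runs (blank_id : Int) (xs : List Int) :
    pvALoop blank_id xs none [] = pvRuns blank_id xs := by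
  induction xs using pvRuns.induct blank_id with
  | case1 => simp [pvALoop, pvRuns]
  | case2 t rest h ih =>
      have hd : ∀ z, (rest.dropWhile (· == t)).head? = some z → z ≠ t := by
        intro z hz hzt
        have := List.head?_dropWhile_not (p := (· == t)) (l := rest)
        rw [hz] at this
        simp [hzt] at this
      simp only [pvALoop]
      have hc : t ≠ blank_id ∧ some t ≠ (none : Option Int) := ⟨h, by simp⟩
      rw [if_pos hc, pvALoop_acc, pvALoop_dropWhile, pvALoop_prev_irrel _ _ _ hd, ih,
        pvRuns, if_pos h]
      simp
  | case3 t rest h ih =>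
      have ht : t = blank_id := by by_contra hc; exact h hc
      have hd : ∀ z, (rest.dropWhile (· == t)).head? = some z → z ≠ t := by
        intro z hz hzt
        have := List.head?_dropWhile_not (p := (· == t)) (l := rest)
        rw [hz] at this
        simp [hzt] at this
      simp only [pvALoop]
      rw [if_neg (by simp [ht]), pvALoop_dropWhile, pvALoop_prev_irrel _ _ _ hd, ih,
        pvRuns, if_neg h]

-- ===== VERDICT (by name: the statement is the Claim_ definition above) =====
theorem remove_duplicates_and_blank_spec : Claim_equal_remove_duplicates_and_blank := by
  intro alignment blank_id _
  unfold Spec_remove_duplicates_and_blank remove_duplicates_and_blank remove_duplicates_and_blank_alt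
  exact pvALoop_eq_runs blank_id alignment
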